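-- pv_equiv track=rewrite | github.com/SandaminiI/Safe-AI-Framework | backend/uml-gen-regex/uml_rules.py | _layer_order
-- ===== SOURCE A (Python) =====
-- from typing import Dict, Any, List, Set, Optional, Tuple
--
-- _LAYER_ORDER: Dict[str, int] = {
--     "client":      5,
--     "controller":  10,
--     "resource":    10,
--     "endpoint":    10,
--     "rest":        10,
--     "handler":     12,
--     "api":         15,
--     "service":     20,
--     "manager":     22,
--     "facade":      22,
--     "business":    22,
--     "interactor":  22,
--     "usecase":     22,
--     "repository":  30,
--     "repo":        30,
--     "dao":         30,
--     "persistence": 32,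
--     "store":       32,
--     "data":        35,
--     "gateway":     38,
--     "database":    40,
--     "db":          40,
--     "entity":      45,
--     "model":       50,
--     "domain":      50,
--     "util":        60,
--     "helper":      60,
--     "config":      70,
--     "security":    75,
--     "filter":      74,
--     "middleware":  73,
-- }
--
-- def _layer_order(type_name: str, package: str) -> int:
--     """Return architectural layer order for a type. Lower = earlier caller."""
--     combined = (type_name + " " + (package or "")).lower()
--     best = 55  # default: middle
--     for keyword, order in _LAYER_ORDER.items():
--         if keyword in combined:
--             if order < best:
--                 best = order
--     return best
-- ===== SOURCE B (Python) =====
-- # B: group keywords into buckets keyed by their order, scan buckets in ascending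
-- # order of order, and return min(order, 55) for the first bucket with any
-- # matching keyword; the ascending bucket scan makes the first hit the minimum.
-- _BUCKETS = [
--     (5,  ["client"]),
--     (10, ["controller", "resource", "endpoint", "rest"]),
--     (12, ["handler"]),
--     (15, ["api"]),
--     (20, ["service"]),
--     (22, ["manager", "facade", "business", "interactor", "usecase"]),
--     (30, ["repository", "repo", "dao"]),
--     (32, ["persistence", "store"]),
--     (35, ["data"]),
--     (38, ["gateway"]),
--     (40, ["database", "db"]),
--     (45, ["entity"]),
--     (50, ["model", "domain"]),
--     (60, ["util", "helper"]),
--     (70, ["config"]),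
--     (73, ["middleware"]),
--     (74, ["filter"]),
--     (75, ["security"]),
-- ]
--
-- def _layer_order(type_name: str, package: str) -> int:
--     """Return architectural layer order for a type. Lower = earlier caller."""
--     combined = (type_name + " " + (package or "")).lower()
--     for order, keywords in _BUCKETS:
--         if any(k in combined for k in keywords):
--             return min(order, 55)
--     return 55
-- ===== Notes on version B (the rewrite author's own statement) =====
-- stated objective: alternative
-- what changed: Replaced the full min-reduction over the flat keyword dict with an early-exit scan over keywords grouped into buckets by order, ordered ascending: the first bucket with any matching keyword yields the minimum, returned capped at 55.
import Mathlib
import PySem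

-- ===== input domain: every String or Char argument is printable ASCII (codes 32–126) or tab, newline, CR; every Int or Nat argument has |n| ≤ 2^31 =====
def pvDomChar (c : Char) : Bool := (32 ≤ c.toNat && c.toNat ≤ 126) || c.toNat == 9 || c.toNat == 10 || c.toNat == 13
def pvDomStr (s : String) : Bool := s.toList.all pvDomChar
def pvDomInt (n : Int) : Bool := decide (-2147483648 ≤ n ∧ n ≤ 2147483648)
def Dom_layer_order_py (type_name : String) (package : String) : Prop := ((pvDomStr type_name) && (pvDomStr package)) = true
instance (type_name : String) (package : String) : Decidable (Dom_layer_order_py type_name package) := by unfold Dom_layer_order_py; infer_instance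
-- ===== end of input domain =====

-- B replaces A's full min-reduction over the flat keyword dict with an early-exit
-- scan over order-keyed buckets of keywords, ascending (objective: alternative).


-- ===== PORT A =====
-- the module-level dict _LAYER_ORDER, in insertion order
def pvLayerDict : List (String × Int) :=
  [("client", 5), ("controller", 10), ("resource", 10), ("endpoint", 10),
   ("rest", 10), ("handler", 12), ("api", 15), ("service", 20), ("manager", 22),
   ("facade", 22), ("business", 22), ("interactor", 22), ("usecase", 22),
   ("repository", 30), ("repo", 30), ("dao", 30), ("persistence", 32),
   ("store", 32), ("data", 35), ("gateway", 38), ("database", 40), ("db", 40),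
   ("entity", 45), ("model", 50), ("domain", 50), ("util", 60), ("helper", 60),
   ("config", 70), ("security", 75), ("filter", 74), ("middleware", 73)]

def layer_order_py (type_name : String) (package : String) : Int :=
  let combined := PySem.Str.lower (type_name ++ " " ++ (if package == "" then "" else package))
  pvLayerDict.foldl
    (fun best ko => if PySem.Str.isIn ko.1 combined then (if ko.2 < best then ko.2 else best) else best)
    55

-- ===== PORT B =====
-- the module-level _BUCKETS list: keywords grouped by order, ascending
def pvBuckets : List (Int × List String) :=
  [(5,  ["client"]),
   (10, ["controller", "resource", "endpoint", "rest"]),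
   (12, ["handler"]),
   (15, ["api"]),
   (20, ["service"]),
   (22, ["manager", "facade", "business", "interactor", "usecase"]),
   (30, ["repository", "repo", "dao"]),
   (32, ["persistence", "store"]),
   (35, ["data"]),
   (38, ["gateway"]),
   (40, ["database", "db"]),
   (45, ["entity"]),
   (50, ["model", "domain"]),
   (60, ["util", "helper"]),
   (70, ["config"]),
   (73, ["middleware"]),
   (74, ["filter"]),
   (75, ["security"])]

-- B's early-exit for-loop over the buckets (any = List.any)
def pvScanBuckets : List (Int × List String) → String → Int
  | [], _ => 55
  | (o, kws) :: t, c => if kws.any (fun k => PySem.Str.isIn k c) then min o 55 else pvScanBuckets t c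

def layer_order_py_alt (type_name : String) (package : String) : Int :=
  let combined := PySem.Str.lower (type_name ++ " " ++ (if package == "" then "" else package))
  pvScanBuckets pvBuckets combined

-- ===== PRECONDITION & SPEC =====
def Spec_layer_order_py (type_name : String) (package : String) (out : Int) : Prop := out = layer_order_py_alt type_name package
instance (type_name : String) (package : String) (out : Int) : Decidable (Spec_layer_order_py type_name package out) := by unfold Spec_layer_order_py; infer_instance

-- ===== CLAIM (what is proved, stated in full; the proofs are below) =====
def Claim_equal_layer_order_py : Prop := ∀ (type_name : String) (package : String), Dom_layer_order_py type_name package → Spec_layer_order_py type_name package (layer_order_py type_name package)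

-- ===== LEMMAS AND PROOFS =====

-- A's loop body, as a function of the combined string
def pvStep (c : String) (best : Int) (ko : String × Int) : Int :=
  if PySem.Str.isIn ko.1 c then (if ko.2 < best then ko.2 else best) else best

-- the buckets flattened back into a (keyword, order) list, sorted by order asc
def pvFlat (bs : List (Int × List String)) : List (String × Int) :=
  bs.flatMap (fun p => p.2.map (fun k => (k, p.1)))

theorem pvStep_rightComm (c : String) : ∀ (b : Int) (x y : String × Int),
    pvStep c (pvStep c b x) y = pvStep c (pvStep c b y) x := by
  intro b x y
  unfold pvStep
  split_ifs <;> omega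

-- once the accumulator is ≤ every remaining order, the fold is stable
theorem pvFoldl_stable (c : String) : ∀ (l : List (String × Int)) (b : Int),
    (∀ x ∈ l, b ≤ x.2) → l.foldl (pvStep c) b = b := by
  intro l
  induction l with
  | nil => intro b _; rfl
  | cons hd t ih =>
    intro b hb
    have hhd : b ≤ hd.2 := hb hd (List.mem_cons_self ..)
    have hstep : pvStep c b hd = b := by unfold pvStep; split_ifs <;> omega
    simp only [List.foldl_cons, hstep]
    exact ih b (fun x hx => hb x (List.mem_cons_of_mem _ hx))

-- B's early-exit scan over one bucket's keywords, inlined into the flat list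
theorem pvFoldl_bucket (c : String) (o : Int) (rest : List (String × Int)) :
    ∀ (kws : List String),
    (kws.map (fun k => (k, o)) ++ rest).foldl (pvStep c) 55 =
      (if kws.any (fun k => PySem.Str.isIn k c) then
        rest.foldl (pvStep c) (min o 55)
       else rest.foldl (pvStep c) 55) := by
  intro kws
  induction kws with
  | nil => simp
  | cons k ks ih =>
    by_cases h : PySem.Str.isIn k c = true
    · have hstep : pvStep c 55 (k, o) = min o 55 := by
        unfold pvStep; simp only [h, if_true]; split_ifs <;> omega
      have hfix : ∀ x ∈ ks.map (fun k => (k, o)), min o 55 ≤ x.2 := by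
        intro x hx
        rcases List.mem_map.mp hx with ⟨k', _, rfl⟩
        exact min_le_left o 55
      simp only [List.map_cons, List.cons_append, List.foldl_cons, hstep,
        List.any_cons, h, Bool.true_or, if_true]
      rw [List.foldl_append]
      rw [pvFoldl_stable c (ks.map (fun k => (k, o))) (min o 55) hfix]
    · rw [Bool.not_eq_true] at h
      have hstep : pvStep c 55 (k, o) = 55 := by unfold pvStep; rw [h]; simp
      simp only [List.map_cons, List.cons_append, List.foldl_cons, hstep,
        List.any_cons, h, Bool.false_or]
      exact ih

-- on ascending buckets, A's min-fold over the flat list is B's bucket scan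
theorem pvFoldl_flat_eq_scan (c : String) : ∀ (bs : List (Int × List String)),
    (∀ p ∈ bs, 0 ≤ p.1) →
    bs.Pairwise (fun x y => x.1 ≤ y.1) →
    (pvFlat bs).foldl (pvStep c) 55 = pvScanBuckets bs c := by
  intro bs
  induction bs with
  | nil => intro _ _; rfl
  | cons hd t ih =>
    intro hpos hp
    rw [List.pairwise_cons] at hp
    obtain ⟨hle, ht⟩ := hp
    obtain ⟨o, kws⟩ := hd
    simp only [pvFlat, List.flatMap_cons]
    rw [pvFoldl_bucket c o _ kws]
    by_cases h : kws.any (fun k => PySem.Str.isIn k c) = true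
    · simp only [h, if_true, pvScanBuckets]
      apply pvFoldl_stable
      intro x hx
      rcases List.mem_flatMap.mp hx with ⟨p, hp, hx'⟩
      rcases List.mem_map.mp hx' with ⟨k', _, rfl⟩
      exact le_trans (min_le_left o 55) (hle p hp)
    · rw [Bool.not_eq_true] at h
      simp only [h, Bool.false_eq_true, if_false, pvScanBuckets]
      exact ih (fun p hp => hpos p (List.mem_cons_of_mem _ hp)) ht

theorem pvPerm : pvLayerDict.Perm (pvFlat pvBuckets) := by decide

theorem pvSorted : pvBuckets.Pairwise (fun x y => x.1 ≤ y.1) := by decide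

theorem pvPos : ∀ p ∈ pvBuckets, 0 ≤ p.1 := by decide

-- ===== VERDICT (by name: the statement is the Claim_ definition above) =====
theorem layer_order_py_spec : Claim_equal_layer_order_py := by
  intro type_name package _
  unfold Spec_layer_order_py layer_order_py layer_order_py_alt
  show List.foldl (pvStep (PySem.Str.lower (type_name ++ " " ++ (if package == "" then "" else package)))) 55 pvLayerDict
     = pvScanBuckets pvBuckets (PySem.Str.lower (type_name ++ " " ++ (if package == "" then "" else package)))
  rw [@List.Perm.foldl_eq _ _ _ _ _ ⟨pvStep_rightComm _⟩ pvPerm]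
  exact pvFoldl_flat_eq_scan _ pvBuckets pvPos pvSorted
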